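-- pv_equiv track=rewrite | github.com/ShadowzinOFC/ShadowCalculator | calculator.py | find_closest_solution
-- ===== SOURCE A (Python) =====
-- def find_closest_solution(target_sum):
--     closest_diff = float('inf')
--     closest_solution = None
--
--     for x in range(1, target_sum):
--         for y in range(1, target_sum):
--             for z in range(1, target_sum):
--                 current_sum = x**3 + y**3 + z**3
--                 current_diff = abs(target_sum - current_sum)
--
--                 if current_diff < closest_diff:
--                     closest_diff = current_diff
--                     closest_solution = (x, y, z)
--
--     return closest_solution
-- ===== SOURCE B (Python) =====
-- def find_closest_solution(target_sum):
--     n = target_sum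
--     if n < 2:
--         return None
--     hi = n - 1
--     best_diff = None
--     best = None
--     for x in range(1, n):
--         x3 = x ** 3
--         for y in range(1, n):
--             rem = n - x3 - y ** 3
--             # least z in [1, hi] with z**3 >= rem (hi + 1 if none), by binary search
--             lo, up = 1, hi + 1
--             while lo < up:
--                 mid = (lo + up) // 2
--                 if mid ** 3 >= rem:
--                     up = mid
--                 else:
--                     lo = mid + 1
--             if lo > hi:
--                 z = hi
--             elif lo == 1:
--                 z = 1
--             elif rem - (lo - 1) ** 3 < lo ** 3 - rem:
--                 z = lo - 1
--             else:
--                 z = lo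
--             d = abs(n - (x3 + y ** 3 + z ** 3))
--             if best_diff is None or d < best_diff:
--                 best_diff = d
--                 best = (x, y, z)
--     return best
-- ===== Notes on version B (the rewrite author's own statement) =====
-- stated objective: faster
-- what changed: Replaced the innermost z-scan by a per-(x,y) binary search for the cube closest to the remaining target (cubes are strictly monotone and, by parity, no two z-values tie), keeping the same strict-improvement update over (x,y) pairs.
import Mathlib
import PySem

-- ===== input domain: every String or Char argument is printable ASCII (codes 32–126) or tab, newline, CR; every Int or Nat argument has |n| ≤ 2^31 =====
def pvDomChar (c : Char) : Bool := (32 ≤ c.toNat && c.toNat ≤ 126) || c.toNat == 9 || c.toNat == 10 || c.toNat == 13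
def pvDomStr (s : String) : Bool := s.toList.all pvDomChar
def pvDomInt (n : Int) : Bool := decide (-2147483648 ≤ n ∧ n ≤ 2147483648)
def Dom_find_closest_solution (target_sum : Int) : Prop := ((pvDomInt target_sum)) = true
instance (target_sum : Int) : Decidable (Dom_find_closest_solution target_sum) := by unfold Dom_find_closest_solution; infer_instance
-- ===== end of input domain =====

-- B replaces A's innermost z-scan by a per-(x,y) binary search over the monotone cubes
-- (same strict-improvement update over (x,y) pairs), an asymptotically faster algorithm.

-- ===== PORT A =====
-- state = (closest_diff : Option Int  (none = float('inf')), closest_solution)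
def pvStepZ (n x y : Int) (s : Option Int × Option (List Int)) (z : Int) :
    Option Int × Option (List Int) :=
  let current_sum := x ^ 3 + y ^ 3 + z ^ 3
  let current_diff := |n - current_sum|
  match s.1 with
  | none => (some current_diff, some [x, y, z])
  | some d => if current_diff < d then (some current_diff, some [x, y, z]) else s

def find_closest_solution (target_sum : Int) : Option (List Int) :=
  ((PySem.List.pyRange 1 target_sum 1).foldl (fun s x =>
    (PySem.List.pyRange 1 target_sum 1).foldl (fun s y =>
      (PySem.List.pyRange 1 target_sum 1).foldl (pvStepZ target_sum x y) s) s)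
    (none, none)).2

-- ===== PORT B =====
-- least z in [lo, up) with rem ≤ z^3 (up if none): the Python `while lo < up` loop
def pvBsearch (rem lo up : Int) : Int :=
  if h : lo < up then
    let mid := PySem.Int.floordiv (lo + up) 2
    if rem ≤ mid ^ 3 then pvBsearch rem lo mid else pvBsearch rem (mid + 1) up
  else lo
termination_by (up - lo).toNat
decreasing_by
  · have h2 : PySem.Int.floordiv (lo + up) 2 < up :=
      (PySem.Int.floordiv_lt_iff_lt_mul (by norm_num)).2 (by omega)
    omega
  · have h1 : lo ≤ PySem.Int.floordiv (lo + up) 2 :=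
      (PySem.Int.le_floordiv_iff_mul_le (by norm_num)).2 (by omega)
    omega

-- the candidate-selection chain after the loop
def pvPickZ (n rem : Int) : Int :=
  let hi := n - 1
  let lo := pvBsearch rem 1 (hi + 1)
  if hi < lo then hi
  else if lo = 1 then 1
  else if rem - (lo - 1) ^ 3 < lo ^ 3 - rem then lo - 1
  else lo

def pvStepPair (n : Int) (s : Option Int × Option (List Int)) (x y : Int) :
    Option Int × Option (List Int) :=
  let rem := n - x ^ 3 - y ^ 3
  let z := pvPickZ n rem
  let d := |n - (x ^ 3 + y ^ 3 + z ^ 3)|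
  match s.1 with
  | none => (some d, some [x, y, z])
  | some bd => if d < bd then (some d, some [x, y, z]) else s

def find_closest_solution_alt (target_sum : Int) : Option (List Int) :=
  if target_sum < 2 then none
  else
    ((PySem.List.pyRange 1 target_sum 1).foldl (fun s x =>
      (PySem.List.pyRange 1 target_sum 1).foldl (fun s y =>
        pvStepPair target_sum s x y) s)
      (none, none)).2

-- ===== PRECONDITION & SPEC =====
def Spec_find_closest_solution (target_sum : Int) (out : Option (List Int)) : Prop := out = find_closest_solution_alt target_sum
instance (target_sum : Int) (out : Option (List Int)) : Decidable (Spec_find_closest_solution target_sum out) := by unfold Spec_find_closest_solution; infer_instance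

-- ===== CLAIM (what is proved, stated in full; the proofs are below) =====
def Claim_equal_find_closest_solution : Prop := ∀ (target_sum : Int), Dom_find_closest_solution target_sum → Spec_find_closest_solution target_sum (find_closest_solution target_sum)

-- ===== LEMMAS AND PROOFS =====

theorem pv_cube_lt {a b : Int} (h : a < b) : a ^ 3 < b ^ 3 := by
  nlinarith [sq_nonneg (a + b), sq_nonneg (a - b), sq_nonneg a, sq_nonneg b,
    mul_pos (sub_pos.2 h) (sub_pos.2 h)]

theorem pv_mid_bounds {lo up : Int} (h : lo < up) :
    lo ≤ PySem.Int.floordiv (lo + up) 2 ∧ PySem.Int.floordiv (lo + up) 2 < up :=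
  ⟨(PySem.Int.le_floordiv_iff_mul_le (by norm_num)).2 (by omega),
   (PySem.Int.floordiv_lt_iff_lt_mul (by norm_num)).2 (by omega)⟩

-- adjacent cubes cannot tie: (lo-1)^3 + lo^3 is odd
theorem pv_no_tie (rem lo : Int) : rem - (lo - 1) ^ 3 ≠ lo ^ 3 - rem := by
  intro he
  obtain ⟨m, hm⟩ := Int.even_mul_succ_self (lo - 1)
  have hexp : (lo - 1) ^ 3 + lo ^ 3 = 2 * lo ^ 3 - 3 * ((lo - 1) * ((lo - 1) + 1)) - 1 := by
    ring
  have h2 : 2 * rem = 2 * lo ^ 3 - 3 * (m + m) - 1 := by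
    rw [← hm, ← hexp]; linarith
  have := h2
  generalize lo ^ 3 = c at this
  omega

-- binary-search correctness
theorem pvBsearch_spec (rem lo up : Int) : lo ≤ up →
    lo ≤ pvBsearch rem lo up ∧ pvBsearch rem lo up ≤ up ∧
    (∀ z, lo ≤ z → z < pvBsearch rem lo up → z ^ 3 < rem) ∧
    (pvBsearch rem lo up < up → rem ≤ (pvBsearch rem lo up) ^ 3) := by
  induction lo, up using pvBsearch.induct rem with
  | case1 lo up hlt mid hle ih =>
    intro _
    obtain ⟨hm1, hm2⟩ := pv_mid_bounds hlt
    have heq : pvBsearch rem lo up = pvBsearch rem lo mid := by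
      rw [pvBsearch]; simp only [dif_pos hlt]; exact if_pos hle
    obtain ⟨i1, i2, i3, i4⟩ := ih (by omega)
    refine heq ▸ ⟨i1, by omega, i3, fun hr => ?_⟩
    by_cases hrm : pvBsearch rem lo mid < mid
    · exact i4 hrm
    · have : pvBsearch rem lo mid = mid := by omega
      rw [this]; exact hle
  | case2 lo up hlt mid hle ih =>
    intro _
    obtain ⟨hm1, hm2⟩ := pv_mid_bounds hlt
    have heq : pvBsearch rem lo up = pvBsearch rem (mid + 1) up := by
      rw [pvBsearch]; simp only [dif_pos hlt]; exact if_neg hle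
    obtain ⟨i1, i2, i3, i4⟩ := ih (by omega)
    refine heq ▸ ⟨by omega, i2, fun z hz1 hz2 => ?_, i4⟩
    by_cases hzm : mid + 1 ≤ z
    · exact i3 z hzm hz2
    · have hle' : mid ^ 3 < rem := by omega
      rcases eq_or_lt_of_le (show z ≤ mid by omega) with hzeq | hzlt
      · rw [hzeq]; exact hle'
      · exact lt_trans (pv_cube_lt hzlt) hle'
  | case3 lo up hlt =>
    intro hle
    have heq : pvBsearch rem lo up = lo := by rw [pvBsearch]; simp only [dif_neg hlt]
    rw [heq]
    exact ⟨le_refl _, hle, fun z hz1 hz2 => by omega, fun h => by omega⟩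

-- pvPickZ is the unique strict minimiser of |rem - z^3| over [1, n-1]
theorem pvPickZ_spec (n rem : Int) (hn : 2 ≤ n) :
    1 ≤ pvPickZ n rem ∧ pvPickZ n rem ≤ n - 1 ∧
    ∀ z, 1 ≤ z → z ≤ n - 1 → z ≠ pvPickZ n rem →
      |rem - (pvPickZ n rem) ^ 3| < |rem - z ^ 3| := by
  obtain ⟨h1r, hrup, hbelow, habove⟩ := pvBsearch_spec rem 1 (n - 1 + 1) (by omega)
  have hpz : pvPickZ n rem =
      (if n - 1 < pvBsearch rem 1 (n - 1 + 1) then n - 1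
       else if pvBsearch rem 1 (n - 1 + 1) = 1 then 1
       else if rem - (pvBsearch rem 1 (n - 1 + 1) - 1) ^ 3 <
           (pvBsearch rem 1 (n - 1 + 1)) ^ 3 - rem then pvBsearch rem 1 (n - 1 + 1) - 1
       else pvBsearch rem 1 (n - 1 + 1)) := rfl
  set r := pvBsearch rem 1 (n - 1 + 1) with hrdef
  rw [hpz]
  by_cases hA : n - 1 < r
  · rw [if_pos hA]
    refine ⟨by omega, by omega, fun z hz1 hz2 hzne => ?_⟩
    have hz3 : z ^ 3 < rem := hbelow z (by omega) (by omega)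
    have hn3 : (n - 1) ^ 3 < rem := hbelow (n - 1) (by omega) (by omega)
    have hcube : z ^ 3 < (n - 1) ^ 3 := pv_cube_lt (by omega)
    rw [abs_of_pos (by linarith), abs_of_pos (by linarith)]
    linarith
  · rw [if_neg hA]
    by_cases hB : r = 1
    · rw [if_pos hB]
      have hr1 : rem ≤ 1 := by
        have := habove (by omega)
        rw [hB] at this; linarith [this]
      refine ⟨le_refl _, by omega, fun z hz1 hz2 hzne => ?_⟩
      have hz1' : (1 : Int) < z := by omega
      have hcube : (1 : Int) ^ 3 < z ^ 3 := pv_cube_lt hz1'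
      rw [abs_of_nonpos (by norm_num; linarith), abs_of_nonpos (by nlinarith)]
      norm_num at *
      linarith
    · have hr2 : 2 ≤ r := by omega
      have ha3 : (r - 1) ^ 3 < rem := hbelow (r - 1) (by omega) (by omega)
      have hr3 : rem ≤ r ^ 3 := habove (by omega)
      have hne := pv_no_tie rem r
      rw [if_neg hB]
      by_cases hC : rem - (r - 1) ^ 3 < r ^ 3 - rem
      · rw [if_pos hC]
        refine ⟨by omega, by omega, fun z hz1 hz2 hzne => ?_⟩
        rw [abs_of_pos (by linarith)]
        rcases lt_trichotomy z (r - 1) with hlt | heq | hgt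
        · have : z ^ 3 < (r - 1) ^ 3 := pv_cube_lt hlt
          rw [abs_of_pos (by linarith)]; linarith
        · omega
        · rcases eq_or_lt_of_le (show r ≤ z by omega) with hzr | hzr
          · rw [← hzr, abs_of_nonpos (by linarith)]; linarith
          · have : r ^ 3 < z ^ 3 := pv_cube_lt hzr
            rw [abs_of_nonpos (by linarith)]; linarith
      · rw [if_neg hC]
        have hC' : r ^ 3 - rem < rem - (r - 1) ^ 3 := by
          rcases lt_or_ge (r ^ 3 - rem) (rem - (r - 1) ^ 3) with h | h
          · exact h
          · exact absurd (by omega : rem - (r - 1) ^ 3 = r ^ 3 - rem) hne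
        refine ⟨by omega, by omega, fun z hz1 hz2 hzne => ?_⟩
        rw [abs_of_nonpos (by linarith)]
        rcases lt_trichotomy z r with hlt | heq | hgt
        · have hzr1 : z ≤ r - 1 := by omega
          rcases eq_or_lt_of_le hzr1 with hzeq | hzlt
          · rw [hzeq, abs_of_pos (by linarith)]; linarith
          · have : z ^ 3 < (r - 1) ^ 3 := pv_cube_lt hzlt
            rw [abs_of_pos (by linarith)]; linarith
        · omega
        · have : r ^ 3 < z ^ 3 := pv_cube_lt hgt
          rw [abs_of_nonpos (by linarith)]; linarith

-- generic strict-improvement step and its fold characterisation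
def pvStep (f : Int → Int) (g : Int → List Int) (s : Option Int × Option (List Int)) (z : Int) :
    Option Int × Option (List Int) :=
  match s.1 with
  | none => (some (f z), some (g z))
  | some d => if f z < d then (some (f z), some (g z)) else s

theorem pv_fold_no_improve (f : Int → Int) (g : Int → List Int) (d : Int) :
    ∀ (L : List Int) (s : Option Int × Option (List Int)), s.1 = some d →
    (∀ z ∈ L, d ≤ f z) → L.foldl (pvStep f g) s = s := by
  intro L
  induction L with
  | nil => intro s _ _; rfl
  | cons z L ih =>
    intro s hs h
    have hstep : pvStep f g s z = s := by
      simp only [pvStep, hs]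
      rw [if_neg (by have := h z (by simp); omega)]
    rw [List.foldl_cons, hstep]
    exact ih s hs fun w hw => h w (by simp [hw])

theorem pv_fold_unique_min (f : Int → Int) (g : Int → List Int) (m : Int) :
    ∀ (L : List Int) (s : Option Int × Option (List Int)), m ∈ L →
    (∀ z ∈ L, z ≠ m → f m < f z) →
    L.foldl (pvStep f g) s =
      (match s.1 with
       | none => (some (f m), some (g m))
       | some d => if f m < d then (some (f m), some (g m)) else s) := by
  intro L
  induction L with
  | nil => intro s hm; exact absurd hm (by simp)
  | cons z L ih =>
    rintro ⟨s1, s2⟩ hm hlt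
    have hrest : ∀ w ∈ L, w ≠ m → f m < f w := fun w hw => hlt w (by simp [hw])
    by_cases hzm : z = m
    · subst hzm
      have hge : ∀ w ∈ L, f z ≤ f w := fun w hw => by
        by_cases hwz : w = z
        · rw [hwz]
        · exact le_of_lt (hlt w (by simp [hw]) hwz)
      cases s1 with
      | none =>
        rw [List.foldl_cons,
          show pvStep f g (none, s2) z = (some (f z), some (g z)) from rfl,
          pv_fold_no_improve f g (f z) L _ rfl hge]
      | some d =>
        by_cases himp : f z < d
        · rw [List.foldl_cons,
            show pvStep f g (some d, s2) z
              = if f z < d then (some (f z), some (g z)) else (some d, s2) from rfl,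
            if_pos himp,
            pv_fold_no_improve f g (f z) L _ rfl hge]
          simp [himp]
        · rw [List.foldl_cons,
            show pvStep f g (some d, s2) z
              = if f z < d then (some (f z), some (g z)) else (some d, s2) from rfl,
            if_neg himp,
            pv_fold_no_improve f g d L _ rfl
              (fun w hw => by
                by_cases hwz : w = z
                · rw [hwz]; omega
                · have := hlt w (by simp [hw]) hwz; omega)]
          simp [himp]
    · have hmL : m ∈ L := by
        rcases List.mem_cons.1 hm with h | h
        · exact absurd h.symm hzm
        · exact h
      have hfz : f m < f z := hlt z (by simp) hzm
      cases s1 with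
      | none =>
        rw [List.foldl_cons,
          show pvStep f g (none, s2) z = (some (f z), some (g z)) from rfl,
          ih _ hmL hrest]
        simp [hfz]
      | some d =>
        by_cases himp : f z < d
        · rw [List.foldl_cons,
            show pvStep f g (some d, s2) z
              = if f z < d then (some (f z), some (g z)) else (some d, s2) from rfl,
            if_pos himp, ih _ hmL hrest]
          simp [hfz, show f m < d by omega]
        · rw [List.foldl_cons,
            show pvStep f g (some d, s2) z
              = if f z < d then (some (f z), some (g z)) else (some d, s2) from rfl,
            if_neg himp, ih _ hmL hrest]

theorem pv_inner_eq (n x y : Int) (hn : 2 ≤ n) (s : Option Int × Option (List Int)) :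
    (PySem.List.pyRange 1 n 1).foldl (pvStepZ n x y) s = pvStepPair n s x y := by
  have habs : ∀ z : Int, n - (x ^ 3 + y ^ 3 + z ^ 3) = (n - x ^ 3 - y ^ 3) - z ^ 3 := by
    intro z; ring
  obtain ⟨hm1, hm2, hmin⟩ := pvPickZ_spec n (n - x ^ 3 - y ^ 3) hn
  have hstep : pvStepZ n x y =
      pvStep (fun z => |n - (x ^ 3 + y ^ 3 + z ^ 3)|) (fun z => [x, y, z]) := rfl
  have hmem : pvPickZ n (n - x ^ 3 - y ^ 3) ∈ PySem.List.pyRange 1 n 1 :=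
    (PySem.List.mem_pyRange_one).2 ⟨hm1, by omega⟩
  rw [hstep, pv_fold_unique_min _ _ (pvPickZ n (n - x ^ 3 - y ^ 3))
    (PySem.List.pyRange 1 n 1) s hmem
    (fun z hz hzne => by
      have hzb := (PySem.List.mem_pyRange_one).1 hz
      have := hmin z hzb.1 (by omega) hzne
      rw [habs z, habs (pvPickZ n (n - x ^ 3 - y ^ 3))]
      exact this)]
  rfl

-- ===== VERDICT (by name: the statement is the Claim_ definition above) =====
theorem find_closest_solution_spec : Claim_equal_find_closest_solution := by
  intro n _
  unfold Spec_find_closest_solution find_closest_solution find_closest_solution_alt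
  by_cases hn : n < 2
  · have : PySem.List.pyRange 1 n 1 = [] := by
      rw [PySem.List.pyRange_one]
      have : (n - 1).toNat = 0 := by omega
      simp [this]
    simp [this, hn]
  · rw [not_lt] at hn
    rw [if_neg (by omega)]
    have hfun : ∀ x : Int, (fun (s : Option Int × Option (List Int)) (y : Int) =>
        (PySem.List.pyRange 1 n 1).foldl (pvStepZ n x y) s)
        = (fun s y => pvStepPair n s x y) := by
      intro x; funext s y; exact pv_inner_eq n x y hn s
    congr 1
    apply PySem.List.foldl_congr_mem
    intro s x _
    rw [hfun x]
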